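-- pv_equiv track=rewrite | github.com/huseyingulme/Kriptoloji | algorithms/RouteCipher.py | _diagonal_write
-- ===== SOURCE A (Python) =====
-- def _diagonal_write(text: str, rows: int, cols: int) -> list:
--     """Diagonal (çapraz) yazar."""
--     matrix = [[' ' for _ in range(cols)] for _ in range(rows)]
--     text_idx = 0
--     # Sol üstten sağ alta
--     for d in range(rows + cols - 1):
--         for i in range(rows):
--             j = d - i
--             if 0 <= j < cols and text_idx < len(text):
--                 matrix[i][j] = text[text_idx]
--                 text_idx += 1
--     return matrix
-- ===== SOURCE B (Python) =====
-- def _diagonal_write(text: str, rows: int, cols: int) -> list: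
--     """Diagonal (çapraz) yazar."""
--     def tri(x):
--         return x * (x + 1) // 2 if x > 0 else 0
--     n = len(text)
--     # base[d] + i = rank of cell (i, d-i) in A's diagonal writing order (closed form)
--     base = [tri(d) - tri(d - rows) - tri(d - cols) + tri(d - rows - cols)
--             - max(0, d - cols + 1)
--             for d in range(rows + cols - 1)]
--     return [[text[k] if (k := base[i + j] + i) < n else ' '
--              for j in range(cols)]
--             for i in range(rows)]
-- ===== Notes on version B (the rewrite author's own statement) =====
-- stated objective: alternative
-- what changed: B replaces A's scatter (mutable matrix written char-by-char along anti-diagonals with a running text index) by a gather: each cell's rank in the diagonal order is a closed form (inclusion-exclusion of triangular numbers, precomputed per diagonal), and the rows are built directly by indexing into the text.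
import Mathlib
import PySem

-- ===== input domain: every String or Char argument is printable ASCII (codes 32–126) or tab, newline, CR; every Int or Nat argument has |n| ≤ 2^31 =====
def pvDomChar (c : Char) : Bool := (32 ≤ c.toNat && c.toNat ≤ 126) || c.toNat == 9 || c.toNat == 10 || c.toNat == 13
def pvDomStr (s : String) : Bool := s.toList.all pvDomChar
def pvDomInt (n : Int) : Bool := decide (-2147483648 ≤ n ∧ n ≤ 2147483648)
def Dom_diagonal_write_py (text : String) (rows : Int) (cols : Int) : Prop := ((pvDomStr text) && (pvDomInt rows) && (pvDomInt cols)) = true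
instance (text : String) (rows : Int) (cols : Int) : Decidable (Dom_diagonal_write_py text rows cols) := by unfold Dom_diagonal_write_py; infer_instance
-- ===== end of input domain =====

-- B replaces A's scatter (mutable matrix filled char-by-char along anti-diagonals) by a
-- gather: each cell's rank in the diagonal order is a closed form (inclusion–exclusion of
-- triangular numbers) and the rows are built directly; same return value, proved equal.

-- matrix = [[' ' for _ in range(cols)] for _ in range(rows)]
def pvInitMatrix (rows cols : Int) : List (List String) :=
  (PySem.List.pyRange 0 rows 1).map (fun _ => List.replicate cols.toNat " ")

-- matrix[i][j] = v  (i, j are in-range non-negative Python ints wherever the ports use this)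
def pvSetCell (m : List (List String)) (i j : Int) (v : String) : List (List String) :=
  m.modify i.toNat (fun row => row.set j.toNat v)

-- ===== PORT A =====
def diagonal_write_py (text : String) (rows : Int) (cols : Int) : List (List String) :=
  let cs := text.toList
  ((PySem.List.pyRange 0 (rows + cols - 1) 1).foldl
    (fun st d =>
      (PySem.List.pyRange 0 rows 1).foldl
        (fun (st : List (List String) × Int) i =>
          let j := d - i
          if 0 ≤ j ∧ j < cols ∧ st.2 < (cs.length : Int) then
            (pvSetCell st.1 i j (String.singleton (cs.getD st.2.toNat ' ')), st.2 + 1)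
          else st) st)
    (pvInitMatrix rows cols, (0 : Int))).1

-- ===== PORT B =====
-- tri(x) = x*(x+1)//2 if x > 0 else 0
def pvTri (x : Int) : Int := if x > 0 then PySem.Int.floordiv (x * (x + 1)) 2 else 0

-- base[d] = tri(d) - tri(d-rows) - tri(d-cols) + tri(d-rows-cols) - max(0, d-cols+1)
def pvBase (rows cols d : Int) : Int :=
  pvTri d - pvTri (d - rows) - pvTri (d - cols) + pvTri (d - rows - cols)
    - max 0 (d - cols + 1)

-- base[i+j]: 0 ≤ i+j < rows+cols-1 for every generated cell, so pyGetD is exact here;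
-- text[k]: for every generated cell 0 ≤ k, so cs.getD k.toNat is exact here
def diagonal_write_py_alt (text : String) (rows : Int) (cols : Int) : List (List String) :=
  let cs := text.toList
  let n : Int := cs.length
  let base := (PySem.List.pyRange 0 (rows + cols - 1) 1).map (fun d => pvBase rows cols d)
  (PySem.List.pyRange 0 rows 1).map (fun i =>
    (PySem.List.pyRange 0 cols 1).map (fun j =>
      let k := PySem.List.pyGetD base (i + j) 0 + i
      if k < n then String.singleton (cs.getD k.toNat ' ') else " "))

-- ===== PRECONDITION & SPEC =====
def Spec_diagonal_write_py (text : String) (rows : Int) (cols : Int) (out : List (List String)) : Prop := out = diagonal_write_py_alt text rows cols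
instance (text : String) (rows : Int) (cols : Int) (out : List (List String)) : Decidable (Spec_diagonal_write_py text rows cols out) := by unfold Spec_diagonal_write_py; infer_instance

-- ===== CLAIM (what is proved, stated in full; the proofs are below) =====
def Claim_equal_diagonal_write_py : Prop := ∀ (text : String) (rows : Int) (cols : Int), Dom_diagonal_write_py text rows cols → Spec_diagonal_write_py text rows cols (diagonal_write_py text rows cols)

-- ===== LEMMAS AND PROOFS =====

-- rank of cell (i, j) in A's diagonal writing order (= pvBase (i+j) + i, written directly)
def pvCellIdx (rows cols i j : Int) : Int :=
  pvTri (i + j) - pvTri (i + j - rows) - pvTri (i + j - cols) + pvTri (i + j - rows - cols)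
    + (i - max 0 (i + j - cols + 1))

-- A's per-cell step, abstracted over the cell coordinate pair
def pvStep (cs : List Char) (st : List (List String) × Int) (p : Int × Int) :
    List (List String) × Int :=
  if st.2 < (cs.length : Int) then
    (pvSetCell st.1 p.1 p.2 (String.singleton (cs.getD st.2.toNat ' ')), st.2 + 1)
  else st

-- a rows×cols matrix given by a function of the (Int) coordinates
def pvMk (rows cols : Int) (f : Int → Int → String) : List (List String) :=
  (PySem.List.pyRange 0 rows 1).map (fun i => (PySem.List.pyRange 0 cols 1).map (fun j => f i j))

-- B's value of cell (i, j)
def pvBCell (cs : List Char) (rows cols i j : Int) : String :=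
  if pvCellIdx rows cols i j < (cs.length : Int) then
    String.singleton (cs.getD (pvCellIdx rows cols i j).toNat ' ')
  else " "

-- number of cells on diagonals 0 .. d-1 (the closed form B uses)
def pvCnt (rows cols d : Int) : Int :=
  pvTri d - pvTri (d - rows) - pvTri (d - cols) + pvTri (d - rows - cols)

-- matrix after A has processed all diagonals < d
def pvMatD (cs : List Char) (rows cols d : Int) : List (List String) :=
  pvMk rows cols (fun i j => if i + j < d then pvBCell cs rows cols i j else " ")

-- matrix after A has additionally processed rows < i0 of diagonal d
def pvPart (cs : List Char) (rows cols d i0 : Int) : List (List String) :=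
  pvMk rows cols (fun i j =>
    if i + j < d ∨ (i + j = d ∧ i < i0) then pvBCell cs rows cols i j else " ")

lemma pvMk_congr (rows cols : Int) (f g : Int → Int → String)
    (h : ∀ i j, 0 ≤ i → i < rows → 0 ≤ j → j < cols → f i j = g i j) :
    pvMk rows cols f = pvMk rows cols g := by
  unfold pvMk
  refine List.map_congr_left (fun i hi => ?_)
  rw [PySem.List.mem_pyRange_one] at hi
  exact List.map_congr_left (fun j hj => by
    rw [PySem.List.mem_pyRange_one] at hj
    exact h i j hi.1 hi.2 hj.1 hj.2)

lemma pvSetCell_mk (rows cols : Int) (f : Int → Int → String) (i j : Int) (v : String)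
    (hi0 : 0 ≤ i) (_hir : i < rows) (hj0 : 0 ≤ j) (_hjc : j < cols) :
    pvSetCell (pvMk rows cols f) i j v
      = pvMk rows cols (fun i' j' => if i' = i ∧ j' = j then v else f i' j') := by
  unfold pvSetCell pvMk
  apply List.ext_getElem
  · simp
  · intro a h1 h2
    rw [List.getElem_modify]
    simp only [List.getElem_map, PySem.List.getElem_pyRange_one, zero_add]
    by_cases hia : i.toNat = a
    · rw [if_pos hia]
      apply List.ext_getElem
      · simp
      · intro b hb1 hb2
        rw [List.getElem_set]
        simp only [List.getElem_map, PySem.List.getElem_pyRange_one, zero_add]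
        have hai : (a : Int) = i := by omega
        by_cases hjb : j.toNat = b
        · rw [if_pos hjb, if_pos ⟨hai, by omega⟩]
        · rw [if_neg hjb, if_neg (by
            intro hc
            exact hjb (by omega))]
    · rw [if_neg hia]
      refine List.map_congr_left (fun b hbmem => ?_)
      rw [PySem.List.mem_pyRange_one] at hbmem
      rw [if_neg (by
        intro hc
        exact hia (by omega))]

lemma pvTri_nonpos (x : Int) (h : x ≤ 0) : pvTri x = 0 := by
  unfold pvTri; rw [if_neg (by omega)]

lemma pvTri_two_mul (x : Int) (h : 0 ≤ x) : 2 * pvTri x = x * (x + 1) := by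
  by_cases hx : 0 < x
  · unfold pvTri
    rw [if_pos hx, PySem.Int.floordiv_eq_ediv_of_pos (by norm_num)]
    obtain ⟨t, ht⟩ := Int.even_mul_succ_self x
    rw [ht]
    omega
  · have hx0 : x = 0 := by omega
    subst hx0
    simp [pvTri]

lemma pvTri_succ (x : Int) : pvTri (x + 1) = pvTri x + (if 0 ≤ x then x + 1 else 0) := by
  by_cases h : 0 ≤ x
  · have h1 := pvTri_two_mul x h
    have h2 := pvTri_two_mul (x + 1) (by omega)
    have hr : (x + 1) * (x + 1 + 1) = x * (x + 1) + 2 * (x + 1) := by ring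
    rw [if_pos h]
    omega
  · rw [if_neg h, pvTri_nonpos x (by omega), pvTri_nonpos (x + 1) (by omega)]
    omega

lemma pvCnt_succ (rows cols d : Int) (_h1 : 1 ≤ rows) (_h2 : 1 ≤ cols) (hd0 : 0 ≤ d)
    (hdD : d < rows + cols - 1) :
    pvCnt rows cols (d + 1)
      = pvCnt rows cols d + (min rows (d + 1) - max 0 (d - cols + 1)) := by
  unfold pvCnt
  have e1 : d + 1 - rows = (d - rows) + 1 := by ring
  have e2 : d + 1 - cols = (d - cols) + 1 := by ring
  have e3 : d + 1 - rows - cols = (d - rows - cols) + 1 := by ring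
  rw [e3, e1, e2, pvTri_succ d, pvTri_succ (d - rows), pvTri_succ (d - cols),
    pvTri_succ (d - rows - cols)]
  split_ifs <;> omega

-- B's cell formula on diagonal d: count of earlier diagonals plus the offset within d
lemma pvCellIdx_diag (rows cols i d : Int) :
    pvCellIdx rows cols i (d - i) = pvCnt rows cols d + (i - max 0 (d - cols + 1)) := by
  unfold pvCellIdx pvCnt
  have e : i + (d - i) = d := by ring
  rw [e]

-- the per-diagonal loop: writes the cells lo ≤ i < hi of diagonal d, in order
lemma pv_diag (cs : List Char) (rows cols d : Int) :
    ∀ (fuel : Nat) (i0 : Int), max 0 (d - cols + 1) ≤ i0 → i0 ≤ min rows (d + 1) →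
      (min rows (d + 1) - i0).toNat ≤ fuel →
    (PySem.List.pyRange i0 (min rows (d + 1)) 1).foldl (fun st i => pvStep cs st (i, d - i))
        (pvPart cs rows cols d i0,
          min (cs.length : Int) (pvCnt rows cols d + (i0 - max 0 (d - cols + 1))))
      = (pvPart cs rows cols d (min rows (d + 1)),
          min (cs.length : Int)
            (pvCnt rows cols d + (min rows (d + 1) - max 0 (d - cols + 1)))) := by
  intro fuel
  induction fuel with
  | zero =>
    intro i0 hlo hhi hfuel
    have : i0 = min rows (d + 1) := by omega
    subst this
    rw [PySem.List.pyRange_one_eq_nil le_rfl, List.foldl_nil]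
  | succ fuel ih =>
    intro i0 hlo hhi hfuel
    by_cases hlt : i0 < min rows (d + 1)
    · rw [PySem.List.pyRange_one_cons hlt, List.foldl_cons]
      set n : Int := (cs.length : Int) with hn
      set k : Int := pvCnt rows cols d + (i0 - max 0 (d - cols + 1)) with hk
      have hcell : pvCellIdx rows cols i0 (d - i0) = k := pvCellIdx_diag rows cols i0 d
      have key : pvStep cs (pvPart cs rows cols d i0, min n k) (i0, d - i0)
          = (pvPart cs rows cols d (i0 + 1),
             min n (pvCnt rows cols d + (i0 + 1 - max 0 (d - cols + 1)))) := by
        by_cases hkn : k < n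
        · have ht : min n k = k := min_eq_right hkn.le
          unfold pvStep
          rw [ht, if_pos hkn]
          have hmat : pvSetCell (pvPart cs rows cols d i0) i0 (d - i0)
              (String.singleton (cs.getD k.toNat ' '))
              = pvPart cs rows cols d (i0 + 1) := by
            unfold pvPart
            rw [pvSetCell_mk rows cols _ i0 (d - i0) _ (by omega) (by omega) (by omega)
              (by omega)]
            apply pvMk_congr
            intro i' j' hb1 hb2 hb3 hb4
            by_cases hij : i' = i0 ∧ j' = d - i0
            · rw [if_pos hij]
              obtain ⟨e1, e2⟩ := hij
              subst e1; subst e2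
              rw [if_pos (by omega)]
              unfold pvBCell
              rw [hcell, if_pos hkn]
            · rw [if_neg hij]
              have hiff : (i' + j' < d ∨ (i' + j' = d ∧ i' < i0))
                  ↔ (i' + j' < d ∨ (i' + j' = d ∧ i' < i0 + 1)) := by
                constructor <;> intro hc <;> omega
              rw [show (if i' + j' < d ∨ (i' + j' = d ∧ i' < i0)
                    then pvBCell cs rows cols i' j' else " ")
                  = (if i' + j' < d ∨ (i' + j' = d ∧ i' < i0 + 1)
                    then pvBCell cs rows cols i' j' else " ") by
                simp only [hiff]]
          rw [hmat]
          have : k + 1 = min n (pvCnt rows cols d + (i0 + 1 - max 0 (d - cols + 1))) := by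
            omega
          rw [this]
        · have ht : min n k = n := min_eq_left (by omega)
          unfold pvStep
          rw [ht, if_neg (by omega)]
          have hmat : pvPart cs rows cols d i0 = pvPart cs rows cols d (i0 + 1) := by
            unfold pvPart
            apply pvMk_congr
            intro i' j' hb1 hb2 hb3 hb4
            by_cases hij : i' = i0 ∧ j' = d - i0
            · obtain ⟨e1, e2⟩ := hij
              subst e1; subst e2
              rw [if_neg (by omega), if_pos (by omega)]
              unfold pvBCell
              rw [hcell, if_neg hkn]
            · have hiff : (i' + j' < d ∨ (i' + j' = d ∧ i' < i0))
                  ↔ (i' + j' < d ∨ (i' + j' = d ∧ i' < i0 + 1)) := by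
                constructor <;> intro hc <;> omega
              simp only [hiff]
          rw [hmat]
          have : n = min n (pvCnt rows cols d + (i0 + 1 - max 0 (d - cols + 1))) := by
            omega
          simp only [Prod.mk.injEq]
          exact ⟨trivial, this⟩
      rw [key]
      exact ih (i0 + 1) (by omega) (by omega) (by omega)
    · have : i0 = min rows (d + 1) := by omega
      subst this
      rw [PySem.List.pyRange_one_eq_nil le_rfl, List.foldl_nil]

lemma pvPart_lo (cs : List Char) (rows cols d : Int) :
    pvPart cs rows cols d (max 0 (d - cols + 1)) = pvMatD cs rows cols d := by
  unfold pvPart pvMatD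
  apply pvMk_congr
  intro i j hb1 hb2 hb3 hb4
  have hiff : (i + j < d ∨ (i + j = d ∧ i < max 0 (d - cols + 1))) ↔ i + j < d := by
    constructor <;> intro hc <;> omega
  simp only [hiff]

lemma pvPart_hi (cs : List Char) (rows cols d : Int) :
    pvPart cs rows cols d (min rows (d + 1)) = pvMatD cs rows cols (d + 1) := by
  unfold pvPart pvMatD
  apply pvMk_congr
  intro i j hb1 hb2 hb3 hb4
  have hiff : (i + j < d ∨ (i + j = d ∧ i < min rows (d + 1))) ↔ i + j < d + 1 := by
    constructor <;> intro hc <;> omega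
  simp only [hiff]

-- filtering an integer range by an interval predicate is the clipped range
lemma pvFilter_pyRange (lo hi : Int) : ∀ (n : Nat) (a b : Int), (b - a).toNat ≤ n →
    (PySem.List.pyRange a b 1).filter (fun i => decide (lo ≤ i ∧ i < hi))
      = PySem.List.pyRange (max a lo) (min b hi) 1 := by
  intro n
  induction n with
  | zero =>
    intro a b h
    rw [PySem.List.pyRange_one_eq_nil (by omega), PySem.List.pyRange_one_eq_nil (by omega)]
    rfl
  | succ n ih =>
    intro a b h
    by_cases hab : a < b
    · rw [PySem.List.pyRange_one_cons hab, List.filter_cons]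
      by_cases hp : lo ≤ a ∧ a < hi
      · rw [if_pos (by simpa using hp)]
        rw [ih (a + 1) b (by omega)]
        have h1 : max (a + 1) lo = a + 1 := by omega
        have h2 : max a lo = a := by omega
        rw [h1, h2]
        exact (PySem.List.pyRange_one_cons (by omega)).symm
      · rw [if_neg (by simpa using hp)]
        rw [ih (a + 1) b (by omega)]
        rcases not_and_or.mp hp with hlo | hhi
        · have h1 : max (a + 1) lo = lo := by omega
          have h2 : max a lo = lo := by omega
          rw [h1, h2]
        · rw [PySem.List.pyRange_one_eq_nil (by omega),
            PySem.List.pyRange_one_eq_nil (by omega)]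
    · rw [PySem.List.pyRange_one_eq_nil (by omega), PySem.List.pyRange_one_eq_nil (by omega)]
      rfl

-- A's inner row scan over one diagonal = a pvStep fold over that diagonal's valid cells
lemma pv_inner (cs : List Char) (rows cols d : Int) (st : List (List String) × Int) :
    (PySem.List.pyRange 0 rows 1).foldl
      (fun (st : List (List String) × Int) i =>
        if 0 ≤ d - i ∧ d - i < cols ∧ st.2 < (cs.length : Int) then
          (pvSetCell st.1 i (d - i) (String.singleton (cs.getD st.2.toNat ' ')), st.2 + 1)
        else st) st
    = ((PySem.List.pyRange (max 0 (d - cols + 1)) (min rows (d + 1)) 1).map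
        (fun i => (i, d - i))).foldl (pvStep cs) st := by
  have hfun : ∀ (st : List (List String) × Int) (i : Int),
      (if 0 ≤ d - i ∧ d - i < cols ∧ st.2 < (cs.length : Int) then
        (pvSetCell st.1 i (d - i) (String.singleton (cs.getD st.2.toNat ' ')), st.2 + 1)
      else st)
      = if d - cols + 1 ≤ i ∧ i < d + 1 then pvStep cs st (i, d - i) else st := by
    intro st i
    by_cases h1 : d - cols + 1 ≤ i ∧ i < d + 1
    · by_cases h2 : st.2 < (cs.length : Int)
      · rw [if_pos ⟨by omega, by omega, h2⟩, if_pos h1]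
        simp [pvStep, h2]
      · rw [if_neg (by tauto), if_pos h1]
        simp [pvStep, h2]
    · rw [if_neg (by omega), if_neg h1]
  rw [PySem.List.foldl_congr_mem _ _
      (fun st i => if d - cols + 1 ≤ i ∧ i < d + 1 then pvStep cs st (i, d - i) else st)
      _ (fun acc x _ => hfun acc x),
    PySem.List.foldl_ite_eq_foldl_filter (fun i => d - cols + 1 ≤ i ∧ i < d + 1)
      (fun st i => pvStep cs st (i, d - i)),
    pvFilter_pyRange (d - cols + 1) (d + 1) rows.toNat 0 rows (by omega)]
  exact (List.foldl_map).symm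

-- the outer loop over the diagonals, from d0 up to rows+cols-1
lemma pv_outer (cs : List Char) (rows cols : Int) (h1 : 1 ≤ rows) (h2 : 1 ≤ cols) :
    ∀ (fuel : Nat) (d0 : Int), 0 ≤ d0 → d0 ≤ rows + cols - 1 →
      (rows + cols - 1 - d0).toNat ≤ fuel →
    (PySem.List.pyRange d0 (rows + cols - 1) 1).foldl
      (fun st d =>
        (PySem.List.pyRange 0 rows 1).foldl
          (fun (st : List (List String) × Int) i =>
            if 0 ≤ d - i ∧ d - i < cols ∧ st.2 < (cs.length : Int) then
              (pvSetCell st.1 i (d - i) (String.singleton (cs.getD st.2.toNat ' ')), st.2 + 1)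
            else st) st)
      (pvMatD cs rows cols d0, min (cs.length : Int) (pvCnt rows cols d0))
    = (pvMatD cs rows cols (rows + cols - 1),
        min (cs.length : Int) (pvCnt rows cols (rows + cols - 1))) := by
  intro fuel
  induction fuel with
  | zero =>
    intro d0 hd0 hdD hfuel
    have : d0 = rows + cols - 1 := by omega
    subst this
    rw [PySem.List.pyRange_one_eq_nil le_rfl, List.foldl_nil]
  | succ fuel ih =>
    intro d0 hd0 hdD hfuel
    by_cases hlt : d0 < rows + cols - 1
    · rw [PySem.List.pyRange_one_cons hlt, List.foldl_cons, pv_inner, List.foldl_map]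
      have hstate : (pvMatD cs rows cols d0, min (cs.length : Int) (pvCnt rows cols d0))
          = (pvPart cs rows cols d0 (max 0 (d0 - cols + 1)),
             min (cs.length : Int)
               (pvCnt rows cols d0
                 + (max 0 (d0 - cols + 1) - max 0 (d0 - cols + 1)))) := by
        rw [pvPart_lo]
        have : pvCnt rows cols d0 + (max 0 (d0 - cols + 1) - max 0 (d0 - cols + 1))
            = pvCnt rows cols d0 := by ring
        rw [this]
      rw [hstate,
        pv_diag cs rows cols d0 (min rows (d0 + 1) - max 0 (d0 - cols + 1)).toNat
          (max 0 (d0 - cols + 1)) le_rfl (by omega) le_rfl,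
        pvPart_hi]
      have hc : pvCnt rows cols d0
            + (min rows (d0 + 1) - max 0 (d0 - cols + 1))
          = pvCnt rows cols (d0 + 1) :=
        (pvCnt_succ rows cols d0 h1 h2 hd0 hlt).symm
      rw [hc]
      exact ih (d0 + 1) (by omega) (by omega) (by omega)
    · have : d0 = rows + cols - 1 := by omega
      subst this
      rw [PySem.List.pyRange_one_eq_nil le_rfl, List.foldl_nil]

-- ===== VERDICT (by name: the statement is the Claim_ definition above) =====
theorem diagonal_write_py_spec : Claim_equal_diagonal_write_py := by
  intro text rows cols _
  unfold Spec_diagonal_write_py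
  by_cases h1 : 1 ≤ rows
  · by_cases h2 : 1 ≤ cols
    · -- main case
      unfold diagonal_write_py
      show ((PySem.List.pyRange 0 (rows + cols - 1) 1).foldl
        (fun st d =>
          (PySem.List.pyRange 0 rows 1).foldl
            (fun (st : List (List String) × Int) i =>
              if 0 ≤ d - i ∧ d - i < cols ∧ st.2 < (text.toList.length : Int) then
                (pvSetCell st.1 i (d - i)
                  (String.singleton (text.toList.getD st.2.toNat ' ')), st.2 + 1)
              else st) st)
        (pvInitMatrix rows cols, (0 : Int))).1 = _
      have hinit : pvInitMatrix rows cols = pvMatD text.toList rows cols 0 := by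
        unfold pvInitMatrix pvMatD pvMk
        refine List.map_congr_left (fun i hi => ?_)
        rw [PySem.List.mem_pyRange_one] at hi
        show List.replicate cols.toNat " "
          = (PySem.List.pyRange 0 cols 1).map
              (fun j => if i + j < 0 then pvBCell text.toList rows cols i j else " ")
        rw [List.map_congr_left (g := fun _ => (" " : String)) (fun j hj => by
          rw [PySem.List.mem_pyRange_one] at hj
          rw [if_neg (by omega)])]
        rw [List.map_const', PySem.List.length_pyRange_one]
        norm_num
      have hcnt0 : (0 : Int) = min (text.toList.length : Int) (pvCnt rows cols 0) := by
        unfold pvCnt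
        rw [pvTri_nonpos 0 le_rfl, pvTri_nonpos (0 - rows) (by omega),
          pvTri_nonpos (0 - cols) (by omega), pvTri_nonpos (0 - rows - cols) (by omega)]
        omega
      have hpair : (pvInitMatrix rows cols, (0 : Int))
          = (pvMatD text.toList rows cols 0,
             min (text.toList.length : Int) (pvCnt rows cols 0)) := by
        simp only [Prod.mk.injEq]
        exact ⟨hinit, hcnt0⟩
      rw [hpair,
        pv_outer text.toList rows cols h1 h2 (rows + cols - 1).toNat 0 le_rfl (by omega)
          (by omega)]
      show pvMatD text.toList rows cols (rows + cols - 1)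
        = pvMk rows cols (fun i j =>
            if PySem.List.pyGetD
                  ((PySem.List.pyRange 0 (rows + cols - 1) 1).map
                    (fun d => pvBase rows cols d)) (i + j) 0 + i
                < (text.toList.length : Int) then
              String.singleton
                (text.toList.getD
                  (PySem.List.pyGetD
                    ((PySem.List.pyRange 0 (rows + cols - 1) 1).map
                      (fun d => pvBase rows cols d)) (i + j) 0 + i).toNat ' ')
            else " ")
      unfold pvMatD
      apply pvMk_congr
      intro i j hb1 hb2 hb3 hb4
      rw [PySem.List.pyGetD_map_pyRange_of_nonneg (fun d => pvBase rows cols d)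
        (rows + cols - 1) (i + j) 0 (by omega) (by omega)]
      have hk : pvBase rows cols (i + j) + i = pvCellIdx rows cols i j := by
        unfold pvBase pvCellIdx
        omega
      rw [hk, if_pos (by omega)]
      rfl
    · -- cols ≤ 0: A never writes; both matrices are rows empty rows
      unfold diagonal_write_py diagonal_write_py_alt pvInitMatrix
      rw [PySem.List.pyRange_one_eq_nil (show cols ≤ 0 by omega)]
      have hinner : ∀ (d : Int) (st : List (List String) × Int),
          (PySem.List.pyRange 0 rows 1).foldl
            (fun (st : List (List String) × Int) i =>
              let j := d - i
              if 0 ≤ j ∧ j < cols ∧ st.2 < (text.toList.length : Int) then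
                (pvSetCell st.1 i j
                  (String.singleton (text.toList.getD st.2.toNat ' ')), st.2 + 1)
              else st) st = st := by
        intro d st
        rw [PySem.List.foldl_congr_mem _ _ (fun st _ => st) _
          (fun acc x _ => by rw [if_neg (by rintro ⟨ha, hb, -⟩; omega)])]
        exact PySem.List.foldl_ignore _ _
      simp only [hinner, PySem.List.foldl_ignore, List.map_nil]
      rw [show cols.toNat = 0 by omega]
      simp
  · -- rows ≤ 0: both matrices are empty
    unfold diagonal_write_py diagonal_write_py_alt pvInitMatrix
    rw [PySem.List.pyRange_one_eq_nil (show rows ≤ 0 by omega)]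
    simp
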